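-- pv_equiv track=rewrite | github.com/jbeal-sk/atestbench | code_assigner.py | assign_codes
-- ===== SOURCE A (Python) =====
-- import string
--
-- _LETTERS = string.ascii_uppercase
--
-- _DIGITS = [str(d) for d in range(1, 10)] + ["0"]  # 1-9 then 0
--
-- MAX_CODES = len(_LETTERS) * len(_DIGITS)  # 26 * 10 = 260
--
-- def assign_codes(photo_names: list[str]) -> dict[str, str]:
--     """
--     Assign sequential alphanumeric codes to a list of photo filenames.
--
--     Codes follow the pattern: A1, A2, ... A9, A0, B1, B2, ... Z9, Z0
--     providing up to 260 unique codes.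
--
--     Args:
--         photo_names: List of photo filename strings.
--
--     Returns:
--         A dictionary mapping each filename to its assigned code.
--
--     Raises:
--         ValueError: If more than 260 photo names are provided.
--     """
--     if len(photo_names) > MAX_CODES:
--         raise ValueError(
--             f"Cannot assign codes to {len(photo_names)} photos. "
--             f"Maximum supported is {MAX_CODES}."
--         )
--
--     result = {}
--     for index, name in enumerate(photo_names):
--         letter = _LETTERS[index // len(_DIGITS)]
--         digit = _DIGITS[index % len(_DIGITS)]
--         result[name] = f"{letter}{digit}"
--
--     return result
-- ===== SOURCE B (Python) =====
-- import string
--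
-- _LETTERS = string.ascii_uppercase
--
-- _DIGITS = [str(d) for d in range(1, 10)] + ["0"]  # 1-9 then 0
--
-- MAX_CODES = len(_LETTERS) * len(_DIGITS)  # 26 * 10 = 260
--
-- def assign_codes(photo_names: list[str]) -> dict[str, str]:
--     if len(photo_names) > MAX_CODES:
--         raise ValueError(
--             f"Cannot assign codes to {len(photo_names)} photos. "
--             f"Maximum supported is {MAX_CODES}."
--         )
--     result = {}
--     remaining = photo_names
--     for letter in _LETTERS:
--         chunk, remaining = remaining[:len(_DIGITS)], remaining[len(_DIGITS):]
--         for digit, name in zip(_DIGITS, chunk):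
--             result[name] = letter + digit
--     return result
-- ===== Notes on version B (the rewrite author's own statement) =====
-- stated objective: alternative
-- what changed: B replaces A's flat enumerate loop with per-index quotient/remainder arithmetic by a chunk-peeling pass: for each letter it peels the next block of ten names off the input and pairs it with the digit cycle, so no index arithmetic is computed at all.
import Mathlib
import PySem

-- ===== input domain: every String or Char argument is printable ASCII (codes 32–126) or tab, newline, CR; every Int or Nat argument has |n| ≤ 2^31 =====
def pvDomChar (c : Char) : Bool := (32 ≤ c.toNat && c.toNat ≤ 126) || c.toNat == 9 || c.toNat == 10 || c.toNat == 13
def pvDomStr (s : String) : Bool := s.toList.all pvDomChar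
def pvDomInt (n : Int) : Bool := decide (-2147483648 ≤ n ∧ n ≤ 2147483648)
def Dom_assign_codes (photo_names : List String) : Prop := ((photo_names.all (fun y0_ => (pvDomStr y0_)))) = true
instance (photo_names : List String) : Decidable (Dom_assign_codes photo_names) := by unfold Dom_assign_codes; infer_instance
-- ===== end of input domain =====

-- B replaces A's per-index quotient/remainder arithmetic by a chunk-peeling pass: each letter takes the next block of ten names off the input and pairs it with the digit cycle (same O(n) cost; alternative decomposition).


-- ===== PORT A =====
-- _LETTERS = string.ascii_uppercase
def pvLetters : String := "ABCDEFGHIJKLMNOPQRSTUVWXYZ"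
-- _DIGITS = [str(d) for d in range(1, 10)] + ["0"]
def pvDigits : List String := (PySem.List.pyRange 1 10 1).map PySem.Int.toStr ++ ["0"]

-- the f-string "{letter}{digit}" is string concatenation, ported exactly as "".join on the two pieces
def assign_codes (photo_names : List String) : List (String × String) :=
  ((PySem.List.enumerate photo_names 0).foldl
    (fun result p =>
      -- _LETTERS[index // len(_DIGITS)]; under Pre_ the index is always in range (getD default never read)
      let letter := (PySem.Str.pyGet? pvLetters (PySem.Int.floordiv p.1 (PySem.List.len pvDigits))).getD ' '
      -- _DIGITS[index % len(_DIGITS)]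
      let digit := (PySem.List.pyGet? pvDigits (PySem.Int.mod p.1 (PySem.List.len pvDigits))).getD ""
      result.insert p.2 (PySem.Str.join "" [String.ofList [letter], digit]))
    PySem.Dict.empty).items

-- ===== PORT B =====
-- for letter in _LETTERS: chunk, remaining = remaining[:10], remaining[10:];
--   for digit, name in zip(_DIGITS, chunk): result[name] = letter + digit
def assign_codes_alt (photo_names : List String) : List (String × String) :=
  (pvLetters.toList.foldl
    (fun (st : PySem.Dict String String × List String) letter =>
      let chunk := PySem.List.slice st.2 none (some (PySem.List.len pvDigits))
      let rest  := PySem.List.slice st.2 (some (PySem.List.len pvDigits)) none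
      ((List.zip pvDigits chunk).foldl
        (fun d p => d.insert p.2 (PySem.Str.join "" [String.ofList [letter], p.1])) st.1,
       rest))
    (PySem.Dict.empty, photo_names)).1.items

-- ===== PRECONDITION & SPEC =====
-- A raises ValueError when more than MAX_CODES = 260 names are given
def Pre_assign_codes (photo_names : List String) : Prop := photo_names.length ≤ 260
instance (photo_names : List String) : Decidable (Pre_assign_codes photo_names) := by unfold Pre_assign_codes; infer_instance
def pvWitness_assign_codes : List String := (["img1.jpg", "img2.jpg", "img3.jpg"])

def Spec_assign_codes (photo_names : List String) (out : List (String × String)) : Prop := out = assign_codes_alt photo_names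
instance (photo_names : List String) (out : List (String × String)) : Decidable (Spec_assign_codes photo_names out) := by unfold Spec_assign_codes; infer_instance

-- ===== CLAIM (what is proved, stated in full; the proofs are below) =====
def Claim_equal_assign_codes : Prop := ∀ (photo_names : List String), Dom_assign_codes photo_names → Pre_assign_codes photo_names → Spec_assign_codes photo_names (assign_codes photo_names)

-- ===== LEMMAS AND PROOFS =====

-- the code string "letter ++ digit"
def pvCode (l : Char) (d : String) : String := PySem.Str.join "" [String.ofList [l], d]

-- the code A computes for index i (exactly A's loop body value)
def pvCodeA (i : Int) : String :=
  PySem.Str.join "" [String.ofList [(PySem.Str.pyGet? pvLetters (PySem.Int.floordiv i (PySem.List.len pvDigits))).getD ' '],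
                     (PySem.List.pyGet? pvDigits (PySem.Int.mod i (PySem.List.len pvDigits))).getD ""]

-- codes generated by a list of letters, in order
def pvCodesOf (ls : List Char) : List String := ls.flatMap (fun l => pvDigits.map (pvCode l))

-- the (name, code) pairs B inserts, chunk by chunk
def pvPairs : List Char → List String → List (String × String)
  | [], _ => []
  | l :: ls, ns =>
      (List.zip pvDigits (ns.take 10)).map (fun p => (p.2, pvCode l p.1)) ++ pvPairs ls (ns.drop 10)

set_option maxRecDepth 4096 in
lemma pvCodesOf_length : (pvCodesOf pvLetters.toList).length = 260 := by decide

set_option maxRecDepth 8192 in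
lemma pvCodesOf_getElem? : ∀ k ∈ List.range 260, (pvCodesOf pvLetters.toList)[k]? = some (pvCodeA k) := by decide

lemma pvZip_eq (names : List String) : ∀ (k : Nat), k + names.length ≤ 260 →
    List.zip names ((pvCodesOf pvLetters.toList).drop k) =
      (PySem.List.enumerate names (k : Int)).map (fun p => (p.2, pvCodeA p.1)) := by
  induction names with
  | nil => intro k _; simp [PySem.List.enumerate_nil]
  | cons n ns ih =>
    intro k hk
    have hk260 : k < 260 := by simp at hk; omega
    have hdrop : (pvCodesOf pvLetters.toList).drop k
        = pvCodeA k :: (pvCodesOf pvLetters.toList).drop (k + 1) := by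
      have h1 := pvCodesOf_getElem? k (List.mem_range.mpr hk260)
      have h2 : k < (pvCodesOf pvLetters.toList).length := by rw [pvCodesOf_length]; exact hk260
      rw [List.drop_eq_getElem_cons h2]
      simp [List.getElem?_eq_getElem h2] at h1
      rw [h1]
    rw [hdrop, PySem.List.enumerate_cons]
    simp only [List.zip_cons_cons, List.map_cons]
    have := ih (k + 1) (by simp at hk ⊢; omega)
    rw [this]
    push_cast
    ring_nf

-- zip distributes over an append on the right
lemma pvZip_append {α β : Type} (x y : List β) : ∀ (ns : List α),
    List.zip ns (x ++ y) = List.zip (ns.take x.length) x ++ List.zip (ns.drop x.length) y := by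
  induction x with
  | nil => intro ns; simp
  | cons b bs ih =>
    intro ns
    cases ns with
    | nil => simp
    | cons a as => simp [List.zip_cons_cons, ih as]

-- zip against a mapped list, re-expressed as a map over the swapped zip
lemma pvZip_map_right {α β γ : Type} (f : β → γ) : ∀ (ns : List α) (ds : List β),
    List.zip ns (ds.map f) = (List.zip ds ns).map (fun p => (p.2, f p.1)) := by
  intro ns
  induction ns with
  | nil => intro ds; simp
  | cons a as ih =>
    intro ds
    cases ds with
    | nil => simp
    | cons d ds' => simp [List.zip_cons_cons, ih ds']

lemma pvPairs_eq_zip : ∀ (ls : List Char) (ns : List String), ns.length ≤ 10 * ls.length →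
    pvPairs ls ns = List.zip ns (pvCodesOf ls) := by
  intro ls
  induction ls with
  | nil =>
    intro ns h
    have : ns = [] := by
      cases ns with
      | nil => rfl
      | cons a as => simp at h
    simp [this, pvPairs, pvCodesOf]
  | cons l ls ih =>
    intro ns h
    have hlen : (pvDigits.map (pvCode l)).length = 10 := by rw [List.length_map]; decide
    have hrec := ih (ns.drop 10) (by simp at h ⊢; omega)
    show (List.zip pvDigits (ns.take 10)).map (fun p => (p.2, pvCode l p.1)) ++ pvPairs ls (ns.drop 10)
        = List.zip ns (pvCodesOf (l :: ls))
    have hcons : pvCodesOf (l :: ls) = pvDigits.map (pvCode l) ++ pvCodesOf ls := by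
      simp [pvCodesOf]
    rw [hcons, pvZip_append, hlen, hrec, pvZip_map_right]

-- B's foldl, with its state made explicit, inserts exactly the pvPairs sequence
lemma pvFoldB : ∀ (ls : List Char) (ns : List String) (d : PySem.Dict String String),
    (ls.foldl
      (fun (st : PySem.Dict String String × List String) letter =>
        let chunk := PySem.List.slice st.2 none (some (PySem.List.len pvDigits))
        let rest  := PySem.List.slice st.2 (some (PySem.List.len pvDigits)) none
        ((List.zip pvDigits chunk).foldl
          (fun d p => d.insert p.2 (PySem.Str.join "" [String.ofList [letter], p.1])) st.1,
         rest))
      (d, ns)).1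
    = (pvPairs ls ns).foldl (fun d q => d.insert q.1 q.2) d := by
  intro ls
  induction ls with
  | nil => intro ns d; simp [pvPairs]
  | cons l ls ih =>
    intro ns d
    have hlen : PySem.List.len pvDigits = ((10 : Nat) : Int) := by decide
    have hchunk : PySem.List.slice ns none (some (PySem.List.len pvDigits)) = ns.take 10 := by
      rw [hlen, PySem.List.slice_to_natCast]
    have hrest : PySem.List.slice ns (some (PySem.List.len pvDigits)) none = ns.drop 10 := by
      rw [hlen, PySem.List.slice_from_natCast]
    simp only [List.foldl_cons, hchunk, hrest]
    rw [ih]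
    show _ = (pvPairs (l :: ls) ns).foldl (fun d q => d.insert q.1 q.2) d
    have : pvPairs (l :: ls) ns
        = (List.zip pvDigits (ns.take 10)).map (fun p => (p.2, pvCode l p.1)) ++ pvPairs ls (ns.drop 10) := rfl
    rw [this, List.foldl_append, List.foldl_map]
    rfl

-- ===== VERDICT (by name: the statement is the Claim_ definition above) =====
theorem assign_codes_spec : Claim_equal_assign_codes := by
  intro names _ hpre
  unfold Spec_assign_codes assign_codes assign_codes_alt
  have hA : (PySem.List.enumerate names 0).foldl
      (fun result p =>
        result.insert p.2 (PySem.Str.join ""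
          [String.ofList [(PySem.Str.pyGet? pvLetters (PySem.Int.floordiv p.1 (PySem.List.len pvDigits))).getD ' '],
           (PySem.List.pyGet? pvDigits (PySem.Int.mod p.1 (PySem.List.len pvDigits))).getD ""]))
      PySem.Dict.empty
      = ((PySem.List.enumerate names 0).map (fun p => (p.2, pvCodeA p.1))).foldl
          (fun d q => d.insert q.1 q.2) PySem.Dict.empty := by
    rw [List.foldl_map]; rfl
  have hz : List.zip names (pvCodesOf pvLetters.toList)
      = (PySem.List.enumerate names 0).map (fun p => (p.2, pvCodeA p.1)) := by
    have := pvZip_eq names 0 (by simpa using hpre)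
    simpa using this
  have hB := pvFoldB pvLetters.toList names PySem.Dict.empty
  have hpairs : pvPairs pvLetters.toList names = List.zip names (pvCodesOf pvLetters.toList) :=
    pvPairs_eq_zip pvLetters.toList names (by simpa using hpre)
  rw [hA, hB, hpairs, hz]
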